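-- pv_equiv track=rewrite | github.com/JJONSOO/Baekjoon | Programmers/등산코스정하기.py | solution
-- ===== SOURCE A (Python) =====
-- from heapq import heappop, heappush
--
-- def solution(n, paths, gates, summits):
--     summits.sort()
--     summits_set = set(summits)
--     graph = [[] for _ in range(n+1)]
--     for i, j, w in paths:
--         graph[i].append((w, j))
--         graph[j].append((w, i))
--
--     q = []
--     visited = [10000001] * (n + 1)
--
--     for gate in gates:
--         heappush(q, (0, gate))
--         visited[gate] = 0
--
--     while q:
--         intensity, node = heappop(q)
--         if node in summits_set or intensity > visited[node]:
--             continue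
--
--         for weight, next_node in graph[node]:
--             new_intensity = max(intensity, weight)
--             if new_intensity < visited[next_node]:
--                 visited[next_node] = new_intensity
--                 heappush(q, (new_intensity, next_node))
--     min_intensity = [0, 10000001]
--     for summit in summits:
--         if visited[summit] < min_intensity[1]:
--             min_intensity[0] = summit
--             min_intensity[1] = visited[summit]
--
--     return min_intensity
-- ===== SOURCE B (Python) =====
-- def solution(n, paths, gates, summits):
--     # Bellman-Ford-style label correction: no priority queue; relax the edge
--     # list repeatedly until a full pass makes no change.
--     INF = 10000001
--     summit_set = set(summits)
--     edges = []
--     for i, j, w in paths: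
--         edges.append((i, j, w))
--         edges.append((j, i, w))
--     best = [INF] * (n + 1)
--     for g in gates:
--         best[g] = 0
--     changed = True
--     while changed:
--         changed = False
--         for u, v, w in edges:
--             if u in summit_set:
--                 continue
--             nv = best[u] if best[u] > w else w
--             if nv < best[v]:
--                 best[v] = nv
--                 changed = True
--     ans = [0, INF]
--     for s in sorted(summits):
--         if best[s] < ans[1]:
--             ans = [s, best[s]]
--     return ans
-- ===== Notes on version B (the rewrite author's own statement) =====
-- stated objective: simpler
-- what changed: Replaces the heap-based Dijkstra-style minimax search with a Bellman-Ford-style relaxation: a plain edge list is swept repeatedly (no priority queue, no per-node adjacency) until a full pass changes nothing.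
-- outside the precondition, e.g. on solution(2, [[0, 2, 8], [-2, -1, 5]], [-3], [2, -2]): A returns [2, 8], B returns [-2, 8]
import Mathlib
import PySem

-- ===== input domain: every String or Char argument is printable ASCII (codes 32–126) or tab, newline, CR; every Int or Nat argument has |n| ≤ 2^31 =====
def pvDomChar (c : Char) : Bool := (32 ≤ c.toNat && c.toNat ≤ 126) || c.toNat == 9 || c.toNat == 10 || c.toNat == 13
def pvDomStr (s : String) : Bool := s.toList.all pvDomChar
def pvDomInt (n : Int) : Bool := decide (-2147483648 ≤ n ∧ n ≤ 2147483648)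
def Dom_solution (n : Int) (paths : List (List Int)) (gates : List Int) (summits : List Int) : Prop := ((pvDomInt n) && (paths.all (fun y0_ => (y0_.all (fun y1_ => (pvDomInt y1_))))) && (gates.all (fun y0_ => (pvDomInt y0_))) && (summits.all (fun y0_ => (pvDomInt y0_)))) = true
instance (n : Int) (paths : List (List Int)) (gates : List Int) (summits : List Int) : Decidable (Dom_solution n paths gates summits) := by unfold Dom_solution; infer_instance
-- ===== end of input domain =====

-- B replaces A's heap-based Dijkstra-minimax with a Bellman-Ford-style edge-list relaxation
-- swept until a pass changes nothing (no priority queue).  A sorts `summits` in place; B does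
-- not mutate its arguments — the equivalence proved here is about the return value.
-- Intensities in both ports are carried as Nat: every Python intensity is ≥ 0, and for
-- intensity ≥ 0 Python's max(intensity, w) equals Nat max intensity w.toNat, so this is exact.

-- ===== PORT A =====

def pvINF : Nat := 10000001

-- Python list index semantics for a list of length n+1: a negative index wraps once.
-- Pre_ keeps every id in [-(n+1), n], where this is exact.
def pvSlot (n : Int) (x : Int) : Nat := (if x < 0 then x + (n + 1) else x).toNat

-- guard shared by both ports: Pre_ guarantees it; outside it Python raises or wraps negatively
def pvRowOK (n i j : Int) : Bool := decide (-(n+1) ≤ i) && decide (i ≤ n) && decide (-(n+1) ≤ j) && decide (j ≤ n)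

-- one `graph[i].append((w, j)); graph[j].append((w, i))` step, adjacency as a function
def pvGraphStep (n : Int) (g : Nat → List (Nat × Nat)) (row : List Int) : Nat → List (Nat × Nat) :=
  match row with
  | [i, j, w] =>
    if pvRowOK n i j then
      let g1 := fun x => if x = pvSlot n i then g x ++ [(w.toNat, pvSlot n j)] else g x
      (fun x => if x = pvSlot n j then g1 x ++ [(w.toNat, pvSlot n i)] else g1 x)
    else g
  | _ => g

-- `for i, j, w in paths:` adjacency building loop
def pvGraphA (n : Int) (paths : List (List Int)) : Nat → List (Nat × Nat) :=
  paths.foldl (pvGraphStep n) (fun _ => [])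

-- one `heappush(q, (0, gate)); visited[gate] = 0` step
def pvInitStep (n : Int) (s : List (Nat × Nat) × List Nat) (g : Int) : List (Nat × Nat) × List Nat :=
  if decide (-(n+1) ≤ g) && decide (g ≤ n) then ((0, pvSlot n g) :: s.1, s.2.set (pvSlot n g) 0) else s

-- `for gate in gates:` initialisation loop
def pvInitA (n : Int) (gates : List Int) : List (Nat × Nat) × List Nat :=
  gates.foldl (pvInitStep n) ([], List.replicate (n + 1).toNat pvINF)

-- heappop: the heap's minimum under Python's (intensity, node) tuple order; equal tuples are
-- identical values, so min-extraction is exactly heapq's observable behaviour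
def pvQMin : List (Nat × Nat) → Nat × Nat
  | [] => (0, 0)
  | a :: t => t.foldl (fun m x => if x.1 < m.1 ∨ (x.1 = m.1 ∧ x.2 < m.2) then x else m) a

-- inner `for weight, next_node in graph[node]` relaxation
def pvRelax (p : Nat) (L : List (Nat × Nat)) (vis : List Nat) (q : List (Nat × Nat)) :
    List Nat × List (Nat × Nat) :=
  L.foldl (fun s e =>
    let ni := max p e.1
    match s.1[e.2]? with
    | some cv => if ni < cv then (s.1.set e.2 ni, (ni, e.2) :: s.2) else s
    | none => s) (vis, q)

theorem pvSum_set_lt {l : List Nat} {i v c : Nat} (h : l[i]? = some c) (hv : v < c) :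
    (l.set i v).sum < l.sum := by
  induction l generalizing i with
  | nil => simp at h
  | cons a t ih =>
    cases i with
    | zero =>
      simp only [List.set_cons_zero, List.sum_cons]
      simp only [List.getElem?_cons_zero, Option.some.injEq] at h
      omega
    | succ k =>
      simp only [List.set_cons_succ, List.sum_cons]
      have := ih (i := k) (by simpa using h)
      omega

theorem pvRelax_sum (p : Nat) (L : List (Nat × Nat)) (vis : List Nat) (q : List (Nat × Nat)) :
    (pvRelax p L vis q).1.sum ≤ vis.sum ∧
      ((pvRelax p L vis q).1.sum = vis.sum → (pvRelax p L vis q).2 = q) := by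
  induction L generalizing vis q with
  | nil => exact ⟨le_rfl, fun _ => rfl⟩
  | cons e t ih =>
    simp only [pvRelax, List.foldl_cons] at *
    cases hcv : vis[e.2]? with
    | none => simpa [hcv] using ih vis q
    | some cv =>
      by_cases hlt : max p e.1 < cv
      · simp only [hlt, if_pos]
        have h1 := pvSum_set_lt hcv hlt
        obtain ⟨ha, _⟩ := ih (vis.set e.2 (max p e.1)) ((max p e.1, e.2) :: q)
        exact ⟨le_trans ha (le_of_lt h1), fun he => absurd he (by omega)⟩
      · simpa [hcv, hlt] using ih vis q

theorem pvQMin_mem (a : Nat × Nat) (t : List (Nat × Nat)) : pvQMin (a :: t) ∈ a :: t := by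
  suffices h : ∀ (t : List (Nat × Nat)) (a : Nat × Nat),
      t.foldl (fun m x => if x.1 < m.1 ∨ (x.1 = m.1 ∧ x.2 < m.2) then x else m) a = a ∨
      t.foldl (fun m x => if x.1 < m.1 ∨ (x.1 = m.1 ∧ x.2 < m.2) then x else m) a ∈ t by
    rcases h t a with h' | h' <;> simp [pvQMin, h']
  intro t
  induction t with
  | nil => intro a; exact Or.inl rfl
  | cons b u ih =>
    intro a
    simp only [List.foldl_cons]
    by_cases hb : b.1 < a.1 ∨ (b.1 = a.1 ∧ b.2 < a.2)
    · rcases ih b with h' | h' <;> simp [hb, h']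
    · rcases ih a with h' | h' <;> simp [hb, h']

theorem pvErase_qmin_lt (a : Nat × Nat) (t : List (Nat × Nat)) :
    ((a :: t).erase (pvQMin (a :: t))).length < (a :: t).length := by
  rw [List.length_erase_of_mem (pvQMin_mem a t)]
  simp

-- `while q:` main loop
def pvLoopA (g : Nat → List (Nat × Nat)) (S : List Nat) : List Nat → List (Nat × Nat) → List Nat
  | vis, [] => vis
  | vis, a :: t =>
    let m := pvQMin (a :: t)
    let q' := (a :: t).erase m
    if S.contains m.2 then pvLoopA g S vis q'
    else
      match vis[m.2]? with
      | none => pvLoopA g S vis q'   -- Python would raise IndexError here; Pre_ excludes it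
      | some c =>
        if c < m.1 then pvLoopA g S vis q'
        else
          let r := pvRelax m.1 (g m.2) vis q'
          pvLoopA g S r.1 r.2
  termination_by vis q => (vis.sum, q.length)
  decreasing_by
  all_goals first
  | exact Prod.Lex.right _ (pvErase_qmin_lt a t)
  | · rcases pvRelax_sum (pvQMin (a :: t)).1 (g (pvQMin (a :: t)).2) vis ((a :: t).erase (pvQMin (a :: t))) with ⟨hle, heq⟩
      rcases lt_or_eq_of_le hle with hlt | he
      · exact Prod.Lex.left _ _ hlt
      · rw [he, heq he]
        exact Prod.Lex.right _ (pvErase_qmin_lt a t)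

def solution (n : Int) (paths : List (List Int)) (gates : List Int) (summits : List Int) : List Int :=
  let ss := PySem.List.sorted summits (fun x => x) false   -- summits.sort()
  -- summits_set = set(summits); stored as the summit SLOTS — under Pre_'s no-aliasing this
  -- membership test is exactly Python's raw-id test
  let sset : PySem.Set Nat := PySem.Set.ofList (ss.map (pvSlot n))
  let g := pvGraphA n paths
  let qv := pvInitA n gates
  let vis := pvLoopA g sset qv.2 qv.1
  let mi := ss.foldl (fun (mi : Int × Int) s =>
      -- visited[summit]: in index range under Pre_; Python raises out of range
      let c : Int := (vis.getD (pvSlot n s) pvINF : Nat)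
      if c < mi.2 then (s, c) else mi) (0, 10000001)
  [mi.1, mi.2]

-- ===== PORT B =====

-- one `edges.append((i,j,w)); edges.append((j,i,w))` step
def pvEdgeStep (n : Int) (es : List (Nat × Nat × Nat)) (row : List Int) : List (Nat × Nat × Nat) :=
  match row with
  | [i, j, w] =>
    if pvRowOK n i j then es ++ [(pvSlot n i, pvSlot n j, w.toNat), (pvSlot n j, pvSlot n i, w.toNat)] else es
  | _ => es

-- `for i, j, w in paths:` edge-list building loop
def pvEdgesB (n : Int) (paths : List (List Int)) : List (Nat × Nat × Nat) :=
  paths.foldl (pvEdgeStep n) []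

-- one `best[g] = 0` step
def pvBestStep (n : Int) (b : List Nat) (g : Int) : List Nat :=
  if decide (-(n+1) ≤ g) && decide (g ≤ n) then b.set (pvSlot n g) 0 else b

-- `best = [INF]*(n+1); for g in gates: best[g] = 0`
def pvBest0 (n : Int) (gates : List Int) : List Nat :=
  gates.foldl (pvBestStep n) (List.replicate (n + 1).toNat pvINF)

-- loop body of one `for u, v, w in edges:` step
def pvPassStep (S : List Nat) (s : List Nat × Bool) (e : Nat × Nat × Nat) : List Nat × Bool :=
  if S.contains e.1 then s
  else
    match s.1[e.1]?, s.1[e.2.1]? with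
    | some bu, some bv =>
      let nv := if e.2.2 < bu then bu else e.2.2   -- best[u] if best[u] > w else w
      if nv < bv then (s.1.set e.2.1 nv, true) else s
    | _, _ => s

-- one full `for u, v, w in edges:` pass, returning (best, changed)
def pvPass (S : List Nat) (es : List (Nat × Nat × Nat)) (best : List Nat) : List Nat × Bool :=
  es.foldl (pvPassStep S) (best, false)

theorem pvPass_sum (S : List Nat) (es : List (Nat × Nat × Nat)) (best : List Nat) :
    (pvPass S es best).1.sum ≤ best.sum ∧
      ((pvPass S es best).2 = true → (pvPass S es best).1.sum < best.sum) := by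
  suffices h : ∀ (es : List (Nat × Nat × Nat)) (s : List Nat × Bool),
      s.1.sum ≤ best.sum → (s.2 = true → s.1.sum < best.sum) →
      (es.foldl (pvPassStep S) s).1.sum ≤ best.sum ∧
        ((es.foldl (pvPassStep S) s).2 = true → (es.foldl (pvPassStep S) s).1.sum < best.sum) by
    simpa only [pvPass] using h es (best, false) le_rfl (by simp)
  intro es
  induction es with
  | nil => intro s h1 h2; exact ⟨h1, h2⟩
  | cons e t ih =>
    intro s h1 h2
    simp only [List.foldl_cons]
    have hstep : (pvPassStep S s e).1.sum ≤ best.sum ∧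
        ((pvPassStep S s e).2 = true → (pvPassStep S s e).1.sum < best.sum) := by
      unfold pvPassStep
      by_cases hS : S.contains e.1 = true
      · rw [if_pos hS]; exact ⟨h1, h2⟩
      · rw [if_neg hS]
        cases hbu : s.1[e.1]? with
        | none => exact ⟨h1, h2⟩
        | some bu =>
          cases hbv : s.1[e.2.1]? with
          | none => exact ⟨h1, h2⟩
          | some bv =>
            by_cases hlt : (if e.2.2 < bu then bu else e.2.2) < bv
            · simp only [hlt, if_pos]
              have hs := pvSum_set_lt hbv hlt
              exact ⟨le_trans (le_of_lt hs) h1, fun _ => lt_of_lt_of_le hs h1⟩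
            · simpa [hlt] using ⟨h1, h2⟩
    exact ih (pvPassStep S s e) hstep.1 hstep.2

-- `while changed:` sweep until a pass makes no change
def pvLoopB (S : List Nat) (es : List (Nat × Nat × Nat)) (best : List Nat) : List Nat :=
  let r := pvPass S es best
  if r.2 then pvLoopB S es r.1 else r.1
  termination_by best.sum
  decreasing_by
    exact (pvPass_sum S es best).2 (by assumption)

def solution_alt (n : Int) (paths : List (List Int)) (gates : List Int) (summits : List Int) : List Int :=
  -- summit_set = set(summits), stored as summit SLOTS (exact under Pre_'s no-aliasing)
  let sset : PySem.Set Nat := PySem.Set.ofList (summits.map (pvSlot n))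
  let es := pvEdgesB n paths
  let best := pvLoopB sset es (pvBest0 n gates)
  let ans := (PySem.List.sorted summits (fun x => x) false).foldl (fun (ans : Int × Int) s =>
      -- best[s]: in index range under Pre_; Python raises out of range
      let c : Int := (best.getD (pvSlot n s) pvINF : Nat)
      if c < ans.2 then (s, c) else ans) (0, 10000001)
  [ans.1, ans.2]

-- ===== PRECONDITION & SPEC =====

-- the node ids an input mentions (path endpoints, gates, summits)
def pvUsedIds (paths : List (List Int)) (gates : List Int) (summits : List Int) : List Int :=
  paths.flatMap (fun row => row.take 2) ++ gates ++ summits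

-- Pre_ is the natural domain of the task: every path row exactly [i, j, w], every id inside
-- Python's index range [-(n+1), n], and no node addressed by two DIFFERENT ids (one negative,
-- one not) that wrap to the same list slot.  Outside it Python A raises (bad row shape,
-- out-of-range index) or — on aliased ids — its answer depends on which alias happens to
-- reach a node, an artefact of negative-index wraparound, not part of the task.
def Pre_solution (n : Int) (paths : List (List Int)) (gates : List Int) (summits : List Int) : Prop :=
  (∀ row ∈ paths, row.length = 3 ∧ ∀ x ∈ row.take 2, -(n+1) ≤ x ∧ x ≤ n) ∧
  (∀ g ∈ gates, -(n+1) ≤ g ∧ g ≤ n) ∧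
  (∀ s ∈ summits, -(n+1) ≤ s ∧ s ≤ n) ∧
  (∀ x ∈ pvUsedIds paths gates summits, ∀ y ∈ pvUsedIds paths gates summits,
    pvSlot n x = pvSlot n y → x = y)

instance (n : Int) (paths : List (List Int)) (gates : List Int) (summits : List Int) : Decidable (Pre_solution n paths gates summits) := by unfold Pre_solution; infer_instance

def pvWitness_solution : Int × List (List Int) × List Int × List Int :=
  (3, [[1, 2, 3], [2, 3, 5], [1, 3, 4]], [1], [3])

def Spec_solution (n : Int) (paths : List (List Int)) (gates : List Int) (summits : List Int) (out : List Int) : Prop := out = solution_alt n paths gates summits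
instance (n : Int) (paths : List (List Int)) (gates : List Int) (summits : List Int) (out : List Int) : Decidable (Spec_solution n paths gates summits out) := by unfold Spec_solution; infer_instance

-- ===== CLAIM (what is proved, stated in full; the proofs are below) =====
def Claim_equal_solution : Prop := ∀ (n : Int) (paths : List (List Int)) (gates : List Int) (summits : List Int), Dom_solution n paths gates summits → Pre_solution n paths gates summits → Spec_solution n paths gates summits (solution n paths gates summits)

-- ===== LEMMAS AND PROOFS =====

-- lt from getElem? some
theorem pvLt_of_some {l : List Nat} {i x : Nat} (h : l[i]? = some x) : i < l.length :=
  (List.getElem?_eq_some_iff.mp h).1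

theorem pvSlot_lt {n x : Int} (h1 : -(n+1) ≤ x) (h2 : x ≤ n) : pvSlot n x < (n+1).toNat := by
  unfold pvSlot; split <;> omega

-- x is an achievable intensity at node v: it is the initial label, or comes from relaxing an
-- edge out of a non-summit node with an achievable intensity.  Both loops only ever write
-- achievable values, and any stable labelling is a pointwise lower bound of achievable values.
inductive pvAch (E : List (Nat × Nat × Nat)) (Sm : Nat → Prop) (init : List Nat) : Nat → Nat → Prop
  | base (v x : Nat) : init[v]? = some x → pvAch E Sm init v x
  | step (u v w y : Nat) : (u, v, w) ∈ E → ¬ Sm u → pvAch E Sm init u y → pvAch E Sm init v (max y w)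

def pvStable (E : List (Nat × Nat × Nat)) (Sm : Nat → Prop) (b : List Nat) : Prop :=
  ∀ u v w, (u, v, w) ∈ E → ¬ Sm u → ∀ bu bv, b[u]? = some bu → b[v]? = some bv → bv ≤ max bu w

structure pvGood (E : List (Nat × Nat × Nat)) (Sm : Nat → Prop) (init : List Nat) (b : List Nat) : Prop where
  len : b.length = init.length
  valid : ∀ (v x : Nat), b[v]? = some x → pvAch E Sm init v x
  le : ∀ (v x y : Nat), b[v]? = some x → init[v]? = some y → x ≤ y
  stable : pvStable E Sm b

theorem pvAch_lower {E : List (Nat × Nat × Nat)} {Sm : Nat → Prop} {init b : List Nat}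
    (hE : ∀ t ∈ E, t.1 < init.length ∧ t.2.1 < init.length)
    (hg : pvGood E Sm init b) :
    ∀ v x, pvAch E Sm init v x → ∀ bv, b[v]? = some bv → bv ≤ x := by
  intro v x hach
  induction hach with
  | base v x hx => intro bv hbv; exact hg.le v bv x hbv hx
  | step u v w y hEm hns _ ih =>
    intro bv hbv
    have hu : u < b.length := hg.len ▸ (hE _ hEm).1
    have hbu : b[u]? = some b[u] := List.getElem?_eq_getElem hu
    have h1 := hg.stable u v w hEm hns _ _ hbu hbv
    have h2 := ih _ hbu
    exact le_trans h1 (max_le_max h2 le_rfl)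

theorem pvGood_unique {E : List (Nat × Nat × Nat)} {Sm : Nat → Prop} {init a b : List Nat}
    (hE : ∀ t ∈ E, t.1 < init.length ∧ t.2.1 < init.length)
    (ga : pvGood E Sm init a) (gb : pvGood E Sm init b) : a = b := by
  apply List.ext_getElem?_iff.mpr
  intro i
  by_cases hi : i < a.length
  · have hib : i < b.length := by rw [gb.len, ← ga.len]; exact hi
    have ha : a[i]? = some a[i] := List.getElem?_eq_getElem hi
    have hb : b[i]? = some b[i] := List.getElem?_eq_getElem hib
    rw [ha, hb]
    have h1 := pvAch_lower hE ga i b[i] (gb.valid i b[i] hb) a[i] ha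
    have h2 := pvAch_lower hE gb i a[i] (ga.valid i a[i] ha) b[i] hb
    exact congrArg some (le_antisymm h1 h2)
  · have h1 := ga.len
    have h2 := gb.len
    rw [List.getElem?_eq_none (by omega), List.getElem?_eq_none (by omega)]

-- every edge produced by the builders has endpoints < (n+1).toNat
theorem pvEdges_bound (n : Int) (paths : List (List Int)) :
    ∀ t ∈ pvEdgesB n paths, t.1 < (n + 1).toNat ∧ t.2.1 < (n + 1).toNat := by
  suffices h : ∀ (rows : List (List Int)) (es : List (Nat × Nat × Nat)),
      (∀ t ∈ es, t.1 < (n + 1).toNat ∧ t.2.1 < (n + 1).toNat) →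
      ∀ t ∈ rows.foldl (pvEdgeStep n) es, t.1 < (n + 1).toNat ∧ t.2.1 < (n + 1).toNat by
    intro t ht
    exact h paths [] (by simp) t ht
  intro rows
  induction rows with
  | nil => intro es hes; simpa using hes
  | cons row rest ih =>
    intro es hes
    simp only [List.foldl_cons]
    apply ih
    unfold pvEdgeStep
    match row with
    | [] => exact hes
    | [_] => exact hes
    | [_, _] => exact hes
    | (_ :: _ :: _ :: _ :: _) => exact hes
    | [i, j, w] =>
      by_cases hok : pvRowOK n i j = true
      · simp only [hok, if_pos]
        intro t ht
        rcases List.mem_append.mp ht with h' | h'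
        · exact hes t h'
        · unfold pvRowOK at hok
          simp only [Bool.and_eq_true, decide_eq_true_eq] at hok
          obtain ⟨⟨⟨hi0, hi1⟩, hj0⟩, hj1⟩ := hok
          simp only [List.mem_cons, List.not_mem_nil, or_false] at h'
          rcases h' with rfl | rfl <;>
            exact ⟨pvSlot_lt (by omega) (by omega), pvSlot_lt (by omega) (by omega)⟩
      · simpa [hok] using hes

-- adjacency function of A and edge list of B describe the same edge set
theorem pvGraph_edges_iff (n : Int) (paths : List (List Int)) :
    ∀ u w v, (w, v) ∈ pvGraphA n paths u ↔ (u, v, w) ∈ pvEdgesB n paths := by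
  suffices h : ∀ (rows : List (List Int)) (g : Nat → List (Nat × Nat)) (es : List (Nat × Nat × Nat)),
      (∀ u w v, (w, v) ∈ g u ↔ (u, v, w) ∈ es) →
      ∀ u w v, (w, v) ∈ (rows.foldl (pvGraphStep n) g) u ↔
        (u, v, w) ∈ rows.foldl (pvEdgeStep n) es by
    intro u w v
    exact h paths (fun _ => []) [] (by simp) u w v
  intro rows
  induction rows with
  | nil => intro g es hinv; simpa using hinv
  | cons row rest ih =>
    intro g es hinv
    simp only [List.foldl_cons]
    apply ih
    unfold pvGraphStep pvEdgeStep
    match row with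
    | [] => exact hinv
    | [_] => exact hinv
    | [_, _] => exact hinv
    | (_ :: _ :: _ :: _ :: _) => exact hinv
    | [i, j, w0] =>
      by_cases hok : pvRowOK n i j = true
      · simp only [hok, if_pos]
        intro u w v
        by_cases hj : u = pvSlot n j <;> by_cases hi : u = pvSlot n i <;>
          simp [hj, hi, hinv, List.mem_append, Prod.ext_iff] <;> aesop
      · simpa [hok] using hinv


-- the two ports build the same initial label array
theorem pvInitA_snd (n : Int) (gates : List Int) : (pvInitA n gates).2 = pvBest0 n gates := by
  unfold pvInitA pvBest0
  suffices h : ∀ (gs : List Int) (q : List (Nat × Nat)) (vis : List Nat),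
      (gs.foldl (pvInitStep n) (q, vis)).2 = gs.foldl (pvBestStep n) vis from h gates [] _
  intro gs
  induction gs with
  | nil => intros; rfl
  | cons g t ih =>
    intro q vis
    simp only [List.foldl_cons]
    unfold pvInitStep pvBestStep
    by_cases hg : (decide (-(n+1) ≤ g) && decide (g ≤ n)) = true
    · rw [if_pos hg, if_pos hg]; exact ih _ _
    · rw [if_neg hg, if_neg hg]; exact ih _ _

theorem pvInit_facts (n : Int) (gates : List Int) :
    ((pvInitA n gates).2).length = (n + 1).toNat ∧
    (∀ a ∈ (pvInitA n gates).1, a.1 = 0 ∧ ((pvInitA n gates).2)[a.2]? = some 0) ∧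
    (∀ (v c : Nat), ((pvInitA n gates).2)[v]? = some c →
      c = pvINF ∨ (c = 0 ∧ (0, v) ∈ (pvInitA n gates).1)) := by
  unfold pvInitA
  suffices h : ∀ (gs : List Int) (q : List (Nat × Nat)) (vis : List Nat),
      vis.length = (n + 1).toNat →
      (∀ a ∈ q, a.1 = 0 ∧ vis[a.2]? = some 0) →
      (∀ (v c : Nat), vis[v]? = some c → c = pvINF ∨ (c = 0 ∧ (0, v) ∈ q)) →
      ((gs.foldl (pvInitStep n) (q, vis)).2.length = (n + 1).toNat ∧
       (∀ a ∈ (gs.foldl (pvInitStep n) (q, vis)).1, a.1 = 0 ∧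
          (gs.foldl (pvInitStep n) (q, vis)).2[a.2]? = some 0) ∧
       (∀ (v c : Nat), (gs.foldl (pvInitStep n) (q, vis)).2[v]? = some c →
          c = pvINF ∨ (c = 0 ∧ (0, v) ∈ (gs.foldl (pvInitStep n) (q, vis)).1))) by
    refine h gates [] _ (by simp) (by simp) ?_
    intro v c hc
    have hv : v < (List.replicate (n + 1).toNat pvINF).length := pvLt_of_some hc
    rw [List.getElem?_replicate_of_lt (by simpa using hv)] at hc
    injection hc with hc'
    exact Or.inl hc'.symm
  intro gs
  induction gs with
  | nil => intro q vis h1 h2 h3; exact ⟨h1, h2, h3⟩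
  | cons g t ih =>
    intro q vis h1 h2 h3
    simp only [List.foldl_cons]
    unfold pvInitStep
    by_cases hg : (decide (-(n+1) ≤ g) && decide (g ≤ n)) = true
    · rw [if_pos hg]
      simp only [Bool.and_eq_true, decide_eq_true_eq] at hg
      have hlt : pvSlot n g < vis.length := by rw [h1]; exact pvSlot_lt (by omega) (by omega)
      apply ih
      · simpa using h1
      · intro a ha
        rcases List.mem_cons.mp ha with rfl | ha
        · exact ⟨rfl, List.getElem?_set_self hlt⟩
        · obtain ⟨ha1, ha2⟩ := h2 a ha
          refine ⟨ha1, ?_⟩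
          by_cases he : a.2 = pvSlot n g
          · rw [he]; exact List.getElem?_set_self hlt
          · rw [List.getElem?_set_ne (fun hh => he hh.symm)]; exact ha2
      · intro v c hc
        by_cases he : v = pvSlot n g
        · subst he
          rw [List.getElem?_set_self hlt] at hc
          exact Or.inr ⟨by injection hc with hc'; omega, List.mem_cons_self ..⟩
        · rw [List.getElem?_set_ne (fun hh => he hh.symm)] at hc
          rcases h3 v c hc with h' | ⟨h', h''⟩
          · exact Or.inl h'
          · exact Or.inr ⟨h', List.mem_cons_of_mem _ h''⟩
    · rw [if_neg hg]; exact ih q vis h1 h2 h3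

-- the invariant both loops maintain (valid, bounded-by-init labels; sound queue entries)
structure pvBInv (E : List (Nat × Nat × Nat)) (Sm : Nat → Prop) (init : List Nat)
    (vis : List Nat) (q : List (Nat × Nat)) : Prop where
  len : vis.length = init.length
  valid : ∀ (v x : Nat), vis[v]? = some x → pvAch E Sm init v x
  le : ∀ (v x y : Nat), vis[v]? = some x → init[v]? = some y → x ≤ y
  qmem : ∀ a ∈ q, a.2 < vis.length ∧ pvAch E Sm init a.2 a.1 ∧
    ∀ (c : Nat), vis[a.2]? = some c → c ≤ a.1

-- a non-summit node is either already relaxed or still has a live queue entry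
def pvCover (E : List (Nat × Nat × Nat)) (vis : List Nat) (q : List (Nat × Nat)) (x : Nat) : Prop :=
  (∀ (v w cu cv : Nat), (x, v, w) ∈ E → vis[x]? = some cu → vis[v]? = some cv → cv ≤ max cu w) ∨
  (∃ c, vis[x]? = some c ∧ (c, x) ∈ q)

-- relation between a state and a later state of A's inner relaxation
structure pvRInv (E : List (Nat × Nat × Nat)) (Sm : Nat → Prop) (init : List Nat)
    (vis : List Nat) (q : List (Nat × Nat)) (vis' : List Nat) (q' : List (Nat × Nat)) : Prop where
  b : pvBInv E Sm init vis' q'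
  mono : ∀ (v c : Nat), vis'[v]? = some c → ∃ c0, vis[v]? = some c0 ∧ c ≤ c0
  chg : ∀ (v c : Nat), vis'[v]? = some c → vis[v]? = some c ∨ (c, v) ∈ q'
  ext : ∀ a ∈ q, a ∈ q'

theorem pvRInv_refl {E : List (Nat × Nat × Nat)} {Sm : Nat → Prop} {init vis : List Nat}
    {q : List (Nat × Nat)} (hb : pvBInv E Sm init vis q) : pvRInv E Sm init vis q vis q :=
  ⟨hb, fun _ c h => ⟨c, h, le_rfl⟩, fun _ _ h => Or.inl h, fun _ h => h⟩

theorem pvRInv_comp {E : List (Nat × Nat × Nat)} {Sm : Nat → Prop}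
    {init vis vis1 vis2 : List Nat} {q q1 q2 : List (Nat × Nat)}
    (h1 : pvRInv E Sm init vis q vis1 q1) (h2 : pvRInv E Sm init vis1 q1 vis2 q2) :
    pvRInv E Sm init vis q vis2 q2 := by
  refine ⟨h2.b, ?_, ?_, fun a ha => h2.ext a (h1.ext a ha)⟩
  · intro v c h
    obtain ⟨c1, hc1, hle1⟩ := h2.mono v c h
    obtain ⟨c0, hc0, hle0⟩ := h1.mono v c1 hc1
    exact ⟨c0, hc0, le_trans hle1 hle0⟩
  · intro v c h
    rcases h2.chg v c h with h' | h'
    · rcases h1.chg v c h' with h'' | h''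
      · exact Or.inl h''
      · exact Or.inr (h2.ext _ h'')
    · exact Or.inr h'

theorem pvRelax_good {E : List (Nat × Nat × Nat)} {Sm : Nat → Prop} {init : List Nat}
    (u p : Nat) (L : List (Nat × Nat)) (vis : List Nat) (q : List (Nat × Nat))
    (hE : ∀ t ∈ E, t.1 < init.length ∧ t.2.1 < init.length)
    (hL : ∀ e ∈ L, (u, e.2, e.1) ∈ E)
    (hnS : ¬ Sm u) (hAchp : pvAch E Sm init u p)
    (hb : pvBInv E Sm init vis q) :
    pvRInv E Sm init vis q (pvRelax p L vis q).1 (pvRelax p L vis q).2 ∧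
    (∀ e ∈ L, ∀ (cv : Nat), (pvRelax p L vis q).1[e.2]? = some cv → cv ≤ max p e.1) := by
  induction L generalizing vis q with
  | nil => exact ⟨pvRInv_refl hb, by simp⟩
  | cons e t ih =>
    have heE := hL e (List.mem_cons_self ..)
    have he2 : e.2 < vis.length := by rw [hb.len]; exact (hE _ heE).2
    cases hcv : vis[e.2]? with
    | none =>
      exact absurd hcv (by simp [he2])
    | some cv =>
      by_cases hlt : max p e.1 < cv
      · have heq : pvRelax p (e :: t) vis q =
            pvRelax p t (vis.set e.2 (max p e.1)) ((max p e.1, e.2) :: q) := by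
          simp only [pvRelax, List.foldl_cons, hcv, hlt, if_pos]
        rw [heq]
        have hb1 : pvBInv E Sm init (vis.set e.2 (max p e.1)) ((max p e.1, e.2) :: q) := by
          refine ⟨by simp [hb.len], ?_, ?_, ?_⟩
          · intro v x hx
            by_cases hv : v = e.2
            · subst hv
              rw [List.getElem?_set_self he2] at hx
              injection hx with hx'
              rw [← hx']
              exact pvAch.step u e.2 e.1 p heE hnS hAchp
            · rw [List.getElem?_set_ne (fun hh => hv hh.symm)] at hx
              exact hb.valid v x hx
          · intro v x y hx hy
            by_cases hv : v = e.2
            · subst hv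
              rw [List.getElem?_set_self he2] at hx
              injection hx with hx'
              have := hb.le e.2 cv y hcv hy
              omega
            · rw [List.getElem?_set_ne (fun hh => hv hh.symm)] at hx
              exact hb.le v x y hx hy
          · intro a ha
            rcases List.mem_cons.mp ha with rfl | ha
            · refine ⟨by simpa using he2, pvAch.step u e.2 e.1 p heE hnS hAchp, ?_⟩
              intro c hc
              rw [List.getElem?_set_self he2] at hc
              injection hc with hc'
              omega
            · obtain ⟨ha1, ha2, ha3⟩ := hb.qmem a ha
              refine ⟨by simpa using ha1, ha2, ?_⟩
              intro c hc
              by_cases hv : a.2 = e.2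
              · rw [hv, List.getElem?_set_self he2] at hc
                injection hc with hc'
                have := ha3 cv (hv ▸ hcv)
                omega
              · rw [List.getElem?_set_ne (fun hh => hv hh.symm)] at hc
                exact ha3 c hc
        have hR1 : pvRInv E Sm init vis q (vis.set e.2 (max p e.1)) ((max p e.1, e.2) :: q) := by
          refine ⟨hb1, ?_, ?_, fun a ha => List.mem_cons_of_mem _ ha⟩
          · intro v c hc
            by_cases hv : v = e.2
            · subst hv
              rw [List.getElem?_set_self he2] at hc
              injection hc with hc'
              exact ⟨cv, hcv, by omega⟩
            · rw [List.getElem?_set_ne (fun hh => hv hh.symm)] at hc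
              exact ⟨c, hc, le_rfl⟩
          · intro v c hc
            by_cases hv : v = e.2
            · subst hv
              rw [List.getElem?_set_self he2] at hc
              injection hc with hc'
              exact Or.inr (by rw [← hc']; exact List.mem_cons_self ..)
            · rw [List.getElem?_set_ne (fun hh => hv hh.symm)] at hc
              exact Or.inl hc
        obtain ⟨hR2, hC8⟩ := ih (hL := fun e' he' => hL e' (List.mem_cons_of_mem _ he')) _ _ hb1
        refine ⟨pvRInv_comp hR1 hR2, ?_⟩
        intro e' he' cv' hcv'
        rcases List.mem_cons.mp he' with rfl | he'
        · obtain ⟨c0, hc0, hle⟩ := hR2.mono e'.2 cv' hcv'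
          rw [List.getElem?_set_self he2] at hc0
          injection hc0 with hc0'
          omega
        · exact hC8 e' he' cv' hcv'
      · have heq : pvRelax p (e :: t) vis q = pvRelax p t vis q := by
          simp only [pvRelax, List.foldl_cons, hcv, hlt, if_neg, not_false_eq_true]
        rw [heq]
        obtain ⟨hR2, hC8⟩ := ih (hL := fun e' he' => hL e' (List.mem_cons_of_mem _ he')) _ _ hb
        refine ⟨hR2, ?_⟩
        intro e' he' cv' hcv'
        rcases List.mem_cons.mp he' with rfl | he'
        · obtain ⟨c0, hc0, hle⟩ := hR2.mono e'.2 cv' hcv'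
          rw [hcv] at hc0
          injection hc0 with hc0'
          omega
        · exact hC8 e' he' cv' hcv'

theorem pvLoopA_good (g : Nat → List (Nat × Nat)) (S : List Nat) (E : List (Nat × Nat × Nat))
    (Sm : Nat → Prop) (init : List Nat)
    (hgE : ∀ (u w v : Nat), (w, v) ∈ g u ↔ (u, v, w) ∈ E)
    (hSm : ∀ x : Nat, S.contains x = true ↔ Sm x)
    (hE : ∀ t ∈ E, t.1 < init.length ∧ t.2.1 < init.length) :
    ∀ (vis : List Nat) (q : List (Nat × Nat)),
      pvBInv E Sm init vis q → (∀ x, x < vis.length → ¬ Sm x → pvCover E vis q x) →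
      pvGood E Sm init (pvLoopA g S vis q) := by
  intro vis q
  induction vis, q using pvLoopA.induct g S with
  | case1 vis =>
    intro hb hcov
    rw [show pvLoopA g S vis [] = vis from by simp [pvLoopA]]
    refine ⟨hb.len, hb.valid, hb.le, ?_⟩
    intro u v w hE' hns bu bv hbu hbv
    have hu : u < vis.length := pvLt_of_some hbu
    rcases hcov u hu hns with h | ⟨c, hc, hcq⟩
    · exact h v w bu bv hE' hbu hbv
    · simp at hcq
  | case2 vis a t m q' hS ih =>
    intro hb hcov
    simp only [show m = pvQMin (a :: t) from rfl,
      show q' = (a :: t).erase (pvQMin (a :: t)) from rfl] at hS ih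
    have hm : pvQMin (a :: t) ∈ a :: t := pvQMin_mem a t
    have hbe : pvBInv E Sm init vis ((a :: t).erase (pvQMin (a :: t))) :=
      ⟨hb.len, hb.valid, hb.le, fun x hx => hb.qmem x (List.mem_of_mem_erase hx)⟩
    have hSmm : Sm (pvQMin (a :: t)).2 := (hSm _).mp hS
    have hcov' : ∀ x, x < vis.length → ¬ Sm x →
        pvCover E vis ((a :: t).erase (pvQMin (a :: t))) x := by
      intro x hx hxS
      rcases hcov x hx hxS with h | ⟨c, hc, hcq⟩
      · exact Or.inl h
      · refine Or.inr ⟨c, hc, ?_⟩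
        refine (List.mem_erase_of_ne ?_).mpr hcq
        intro hh
        exact hxS (by rw [show x = (pvQMin (a :: t)).2 from congrArg Prod.snd hh]; exact hSmm)
    have heq : pvLoopA g S vis (a :: t) =
        pvLoopA g S vis ((a :: t).erase (pvQMin (a :: t))) := by
      rw [pvLoopA]; simp only [hS, if_pos]
    rw [heq]
    exact ih hbe hcov'
  | case3 vis a t m q' hS hnone ih =>
    intro hb _
    simp only [show m = pvQMin (a :: t) from rfl,
      show q' = (a :: t).erase (pvQMin (a :: t)) from rfl] at hS hnone ih
    have hm := hb.qmem (pvQMin (a :: t)) (pvQMin_mem a t)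
    have : (pvQMin (a :: t)).2 < vis.length := hm.1
    rw [List.getElem?_eq_some_iff.mpr ⟨this, rfl⟩] at hnone
    cases hnone
  | case4 vis a t m q' hS c hsome hlt ih =>
    intro hb hcov
    simp only [show m = pvQMin (a :: t) from rfl,
      show q' = (a :: t).erase (pvQMin (a :: t)) from rfl] at hS hsome hlt ih
    have hm : pvQMin (a :: t) ∈ a :: t := pvQMin_mem a t
    have hbe : pvBInv E Sm init vis ((a :: t).erase (pvQMin (a :: t))) :=
      ⟨hb.len, hb.valid, hb.le, fun x hx => hb.qmem x (List.mem_of_mem_erase hx)⟩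
    have hcov' : ∀ x, x < vis.length → ¬ Sm x →
        pvCover E vis ((a :: t).erase (pvQMin (a :: t))) x := by
      intro x hx hxS
      rcases hcov x hx hxS with h | ⟨c', hc', hcq⟩
      · exact Or.inl h
      · refine Or.inr ⟨c', hc', ?_⟩
        refine (List.mem_erase_of_ne ?_).mpr hcq
        intro hh
        have hx2 : x = (pvQMin (a :: t)).2 := congrArg Prod.snd hh
        have hc1 : c' = (pvQMin (a :: t)).1 := congrArg Prod.fst hh
        rw [hx2, hsome] at hc'
        injection hc' with hc''
        omega
    have heq : pvLoopA g S vis (a :: t) =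
        pvLoopA g S vis ((a :: t).erase (pvQMin (a :: t))) := by
      rw [pvLoopA]; simp [hsome, hlt]
    rw [heq]
    exact ih hbe hcov'
  | case5 vis a t m q' hS c hsome hge r0 ih =>
    intro hb hcov
    simp only [show m = pvQMin (a :: t) from rfl,
      show r0 = pvRelax (pvQMin (a :: t)).1 (g (pvQMin (a :: t)).2) vis
        ((a :: t).erase (pvQMin (a :: t))) from rfl] at hS hsome hge ih
    have hm : pvQMin (a :: t) ∈ a :: t := pvQMin_mem a t
    obtain ⟨hmlt, hmach, hmle⟩ := hb.qmem (pvQMin (a :: t)) hm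
    have hceq : c = (pvQMin (a :: t)).1 := le_antisymm (hmle c hsome) (by omega)
    subst hceq
    have hsome' : vis[(pvQMin (a :: t)).2]? = some (pvQMin (a :: t)).1 := hsome
    have hnS : ¬ Sm (pvQMin (a :: t)).2 := fun h => hS ((hSm _).mpr h)
    have hbe : pvBInv E Sm init vis ((a :: t).erase (pvQMin (a :: t))) :=
      ⟨hb.len, hb.valid, hb.le, fun x hx => hb.qmem x (List.mem_of_mem_erase hx)⟩
    have hL : ∀ e ∈ g (pvQMin (a :: t)).2, ((pvQMin (a :: t)).2, e.2, e.1) ∈ E := by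
      intro e he
      exact (hgE (pvQMin (a :: t)).2 e.1 e.2).mp (by simpa using he)
    obtain ⟨hR, hC8⟩ := pvRelax_good (pvQMin (a :: t)).2 (pvQMin (a :: t)).1
      (g (pvQMin (a :: t)).2) vis ((a :: t).erase (pvQMin (a :: t))) hE hL hnS hmach hbe
    set r := pvRelax (pvQMin (a :: t)).1 (g (pvQMin (a :: t)).2) vis
      ((a :: t).erase (pvQMin (a :: t))) with hr
    have hlenr : r.1.length = vis.length := by rw [hR.b.len, hb.len]
    have hcov' : ∀ x, x < r.1.length → ¬ Sm x → pvCover E r.1 r.2 x := by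
      intro x hx hxS
      have hxv : x < vis.length := by omega
      cases hrx : r.1[x]? with
      | none => exact absurd hrx (by simp [hx])
      | some cx =>
        by_cases hxm : x = (pvQMin (a :: t)).2
        · subst hxm
          rcases hR.chg _ cx hrx with hsame | hq
          · have hcx : cx = (pvQMin (a :: t)).1 := by
              rw [hsome'] at hsame; injection hsame with h'; omega
            refine Or.inl ?_
            intro v w cu cv hEe hcu hcv
            have hcu' : cu = cx := by rw [hrx] at hcu; injection hcu with h'; omega
            have := hC8 (w, v) (by simpa using (hgE _ w v).mpr hEe) cv hcv
            simpa [hcu', hcx] using this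
          · exact Or.inr ⟨cx, hrx, hq⟩
        · rcases hcov x hxv hxS with hst | ⟨c', hc', hcq⟩
          · rcases hR.chg x cx hrx with hsame | hq2
            · refine Or.inl ?_
              intro v w cu cv hEe hcu hcv
              have hcu' : cu = cx := by rw [hrx] at hcu; injection hcu with h'; omega
              obtain ⟨cv0, hcv0, hcvle⟩ := hR.mono v cv hcv
              have := hst v w cx cv0 hEe hsame hcv0
              have : cv ≤ max cx w := le_trans hcvle this
              rw [hcu']
              exact this
            · exact Or.inr ⟨cx, hrx, hq2⟩
          · have hne : (c', x) ≠ pvQMin (a :: t) := by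
              intro hh
              exact hxm (congrArg Prod.snd hh)
            have hq' : (c', x) ∈ (a :: t).erase (pvQMin (a :: t)) :=
              (List.mem_erase_of_ne hne).mpr hcq
            have hqr : (c', x) ∈ r.2 := hR.ext _ hq'
            rcases hR.chg x cx hrx with hsame | hq2
            · have hcx : cx = c' := by rw [hc'] at hsame; injection hsame with h'; omega
              exact Or.inr ⟨cx, hrx, by rw [hcx]; exact hqr⟩
            · exact Or.inr ⟨cx, hrx, hq2⟩
    have heq : pvLoopA g S vis (a :: t) = pvLoopA g S r.1 r.2 := by
      rw [pvLoopA]; simp [hsome, ← hr]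
      intro hmem
      exact absurd (List.contains_iff_mem.mpr hmem) hS
    rw [heq]
    exact ih hR.b hcov'

-- a pass preserves the invariant; an unchanged pass certifies stability
theorem pvPass_spec (S : List Nat) (E : List (Nat × Nat × Nat)) (Sm : Nat → Prop) (init : List Nat)
    (hSm : ∀ x : Nat, S.contains x = true ↔ Sm x)
    (hE : ∀ t ∈ E, t.1 < init.length ∧ t.2.1 < init.length) :
    ∀ (es : List (Nat × Nat × Nat)), (∀ t ∈ es, t ∈ E) →
    ∀ (s : List Nat × Bool),
      s.1.length = init.length →
      (∀ (v x : Nat), s.1[v]? = some x → pvAch E Sm init v x) →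
      (∀ (v x y : Nat), s.1[v]? = some x → init[v]? = some y → x ≤ y) →
      ((es.foldl (pvPassStep S) s).1.length = init.length ∧
       (∀ (v x : Nat), (es.foldl (pvPassStep S) s).1[v]? = some x → pvAch E Sm init v x) ∧
       (∀ (v x y : Nat), (es.foldl (pvPassStep S) s).1[v]? = some x → init[v]? = some y → x ≤ y) ∧
       (s.2 = true → (es.foldl (pvPassStep S) s).2 = true) ∧
       ((es.foldl (pvPassStep S) s).2 = false → (es.foldl (pvPassStep S) s).1 = s.1 ∧
          ∀ t ∈ es, ¬ Sm t.1 → ∀ (bu bv : Nat),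
            s.1[t.1]? = some bu → s.1[t.2.1]? = some bv → bv ≤ max bu t.2.2)) := by
  intro es
  induction es with
  | nil =>
    intro _ s h1 h2 h3
    exact ⟨h1, h2, h3, fun h => h, fun _ => ⟨rfl, by simp⟩⟩
  | cons e t ih =>
    intro hes s h1 h2 h3
    have heE : e ∈ E := hes e (List.mem_cons_self ..)
    have hu : e.1 < s.1.length := by rw [h1]; exact (hE e heE).1
    have hv : e.2.1 < s.1.length := by rw [h1]; exact (hE e heE).2
    simp only [List.foldl_cons]
    by_cases hS : S.contains e.1 = true
    · have hstep : pvPassStep S s e = s := by unfold pvPassStep; rw [if_pos hS]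
      rw [hstep]
      obtain ⟨g1, g2, g3, g4, g5⟩ := ih (fun t' ht' => hes t' (List.mem_cons_of_mem _ ht')) s h1 h2 h3
      refine ⟨g1, g2, g3, g4, ?_⟩
      intro hf
      obtain ⟨ge, grel⟩ := g5 hf
      refine ⟨ge, ?_⟩
      intro t' ht' hns bu bv hbu hbv
      rcases List.mem_cons.mp ht' with rfl | ht'
      · exact absurd ((hSm _).mp hS) hns
      · exact grel t' ht' hns bu bv hbu hbv
    · have hbu : s.1[e.1]? = some s.1[e.1] := List.getElem?_eq_getElem hu
      have hbv : s.1[e.2.1]? = some s.1[e.2.1] := List.getElem?_eq_getElem hv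
      have hnS : ¬ Sm e.1 := fun h => hS ((hSm _).mpr h)
      by_cases hlt : (if e.2.2 < s.1[e.1] then s.1[e.1] else e.2.2) < s.1[e.2.1]
      · -- a relaxation happens: the flag is true and the new label is achievable
        have hstep : pvPassStep S s e =
            (s.1.set e.2.1 (if e.2.2 < s.1[e.1] then s.1[e.1] else e.2.2), true) := by
          unfold pvPassStep
          rw [if_neg hS, hbu, hbv]
          simp only [hlt, if_pos]
        rw [hstep]
        have hmax : (if e.2.2 < s.1[e.1] then s.1[e.1] else e.2.2) = max s.1[e.1] e.2.2 := by
          by_cases hc : e.2.2 < s.1[e.1] <;> simp [hc, Nat.max_def]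

        have hach : pvAch E Sm init e.2.1 (if e.2.2 < s.1[e.1] then s.1[e.1] else e.2.2) := by
          rw [hmax]
          exact pvAch.step e.1 e.2.1 e.2.2 s.1[e.1] (by simpa using heE) hnS
            (h2 e.1 s.1[e.1] hbu)
        have h1' : (s.1.set e.2.1 (if e.2.2 < s.1[e.1] then s.1[e.1] else e.2.2)).length
            = init.length := by simpa using h1
        have h2' : ∀ (v x : Nat),
            (s.1.set e.2.1 (if e.2.2 < s.1[e.1] then s.1[e.1] else e.2.2))[v]? = some x →
            pvAch E Sm init v x := by
          intro v x hx
          by_cases hve : v = e.2.1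
          · subst hve
            rw [List.getElem?_set_self hv] at hx
            injection hx with hx'
            rw [← hx']
            exact hach
          · rw [List.getElem?_set_ne (fun hh => hve hh.symm)] at hx
            exact h2 v x hx
        have h3' : ∀ (v x y : Nat),
            (s.1.set e.2.1 (if e.2.2 < s.1[e.1] then s.1[e.1] else e.2.2))[v]? = some x →
            init[v]? = some y → x ≤ y := by
          intro v x y hx hy
          by_cases hve : v = e.2.1
          · subst hve
            rw [List.getElem?_set_self hv] at hx
            injection hx with hx'
            have := h3 e.2.1 s.1[e.2.1] y hbv hy
            omega
          · rw [List.getElem?_set_ne (fun hh => hve hh.symm)] at hx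
            exact h3 v x y hx hy
        obtain ⟨g1, g2, g3, g4, g5⟩ := ih (fun t' ht' => hes t' (List.mem_cons_of_mem _ ht'))
          (s.1.set e.2.1 (if e.2.2 < s.1[e.1] then s.1[e.1] else e.2.2), true) h1' h2' h3'
        refine ⟨g1, g2, g3, fun _ => g4 rfl, ?_⟩
        intro hf
        exact absurd (g4 rfl) (by rw [hf]; simp)
      · have hstep : pvPassStep S s e = s := by
          unfold pvPassStep
          rw [if_neg hS, hbu, hbv]
          simp only [hlt, if_neg, not_false_eq_true]
        rw [hstep]
        obtain ⟨g1, g2, g3, g4, g5⟩ := ih (fun t' ht' => hes t' (List.mem_cons_of_mem _ ht')) s h1 h2 h3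
        refine ⟨g1, g2, g3, g4, ?_⟩
        intro hf
        obtain ⟨ge, grel⟩ := g5 hf
        refine ⟨ge, ?_⟩
        intro t' ht' hns bu bv hbu' hbv'
        rcases List.mem_cons.mp ht' with rfl | ht'
        · have hbu2 : bu = s.1[t'.1] := by rw [hbu] at hbu'; injection hbu' with h'; omega
          have hbv2 : bv = s.1[t'.2.1] := by rw [hbv] at hbv'; injection hbv' with h'; omega
          subst hbu2; subst hbv2
          have hmx : max s.1[t'.1] t'.2.2 = (if t'.2.2 < s.1[t'.1] then s.1[t'.1] else t'.2.2) := by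
            by_cases hc : t'.2.2 < s.1[t'.1] <;> simp [hc, Nat.max_def]
          rw [hmx]
          omega
        · exact grel t' ht' hns bu bv hbu' hbv'

theorem pvLoopB_good (S : List Nat) (E : List (Nat × Nat × Nat)) (Sm : Nat → Prop) (init : List Nat)
    (hSm : ∀ x : Nat, S.contains x = true ↔ Sm x)
    (hE : ∀ t ∈ E, t.1 < init.length ∧ t.2.1 < init.length) :
    ∀ (best : List Nat),
      best.length = init.length →
      (∀ (v x : Nat), best[v]? = some x → pvAch E Sm init v x) →
      (∀ (v x y : Nat), best[v]? = some x → init[v]? = some y → x ≤ y) →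
      pvGood E Sm init (pvLoopB S E best) := by
  intro best
  induction best using pvLoopB.induct S E with
  | case1 best r htrue ih =>
    intro h1 h2 h3
    simp only [show r = pvPass S E best from rfl] at htrue ih
    have heq : pvLoopB S E best = pvLoopB S E (pvPass S E best).1 := by
      rw [pvLoopB]; simp [htrue]
    rw [heq]
    obtain ⟨g1, g2, g3, _, _⟩ :=
      pvPass_spec S E Sm init hSm hE E (fun _ h => h) (best, false) h1 h2 h3
    exact ih g1 g2 g3
  | case2 best r hfalse =>
    intro h1 h2 h3
    simp only [show r = pvPass S E best from rfl] at hfalse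
    have heq : pvLoopB S E best = (pvPass S E best).1 := by
      rw [pvLoopB]; simp [hfalse]
    rw [heq]
    obtain ⟨g1, g2, g3, _, g5⟩ :=
      pvPass_spec S E Sm init hSm hE E (fun _ h => h) (best, false) h1 h2 h3
    obtain ⟨ge, grel⟩ := g5 (by simpa using hfalse)
    rw [show (pvPass S E best).1 = best from ge]
    refine ⟨h1, h2, h3, ?_⟩
    intro u v w hEm hns bu bv hbu hbv
    exact grel (u, v, w) hEm hns bu bv hbu hbv

-- ===== VERDICT (by name: the statement is the Claim_ definition above) =====
theorem solution_spec : Claim_equal_solution := by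
  unfold Claim_equal_solution
  intro n paths gates summits _ hPre
  unfold Spec_solution
  obtain ⟨hlen0, hq0, hv0⟩ := pvInit_facts n gates
  have hsnd := pvInitA_snd n gates
  rw [hsnd] at hlen0 hq0 hv0
  have hSmA : ∀ x : Nat,
      (PySem.Set.ofList ((PySem.List.sorted summits (fun y => y) false).map (pvSlot n))).contains x
        = true ↔ x ∈ summits.map (pvSlot n) := by
    intro x
    simp [PySem.Set.mem_ofList, PySem.List.mem_sorted]
  have hSmB : ∀ x : Nat,
      (PySem.Set.ofList (summits.map (pvSlot n))).contains x = true ↔ x ∈ summits.map (pvSlot n) := by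
    intro x
    simp [PySem.Set.mem_ofList]
  have hE' : ∀ t ∈ pvEdgesB n paths,
      t.1 < (pvBest0 n gates).length ∧ t.2.1 < (pvBest0 n gates).length := by
    intro t ht
    have h := pvEdges_bound n paths t ht
    exact ⟨by rw [hlen0]; exact h.1, by rw [hlen0]; exact h.2⟩
  have hval : ∀ (v x : Nat), (pvBest0 n gates)[v]? = some x →
      pvAch (pvEdgesB n paths) (fun x : Nat => x ∈ summits.map (pvSlot n)) (pvBest0 n gates) v x :=
    fun v x h => pvAch.base v x h
  have hle : ∀ (v x y : Nat), (pvBest0 n gates)[v]? = some x →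
      (pvBest0 n gates)[v]? = some y → x ≤ y := by
    intro v x y hx hy
    rw [hx] at hy
    injection hy with h
    omega
  have hbA : pvBInv (pvEdgesB n paths) (fun x : Nat => x ∈ summits.map (pvSlot n))
      (pvBest0 n gates) (pvBest0 n gates) (pvInitA n gates).1 := by
    refine ⟨rfl, hval, hle, ?_⟩
    intro a ha
    obtain ⟨ha1, ha2⟩ := hq0 a ha
    refine ⟨pvLt_of_some ha2, by rw [ha1]; exact pvAch.base a.2 0 ha2, ?_⟩
    intro c hc
    rw [ha2] at hc
    injection hc with h
    omega
  have hcovA : ∀ x, x < (pvBest0 n gates).length → ¬ x ∈ summits.map (pvSlot n) →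
      pvCover (pvEdgesB n paths) (pvBest0 n gates) (pvInitA n gates).1 x := by
    intro x hx _
    have hsome : (pvBest0 n gates)[x]? = some (pvBest0 n gates)[x] :=
      List.getElem?_eq_getElem hx
    rcases hv0 x (pvBest0 n gates)[x] hsome with hINF | ⟨h0, hq⟩
    · refine Or.inl ?_
      intro v w cu cv hEe hcu hcv
      have hcu' : cu = pvINF := by
        rw [hsome] at hcu; injection hcu with h; omega
      have hcvle : cv ≤ pvINF := by
        rcases hv0 v cv hcv with h | ⟨h, _⟩
        · omega
        · omega
      calc cv ≤ pvINF := hcvle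
        _ = cu := hcu'.symm
        _ ≤ max cu w := le_max_left _ _
    · exact Or.inr ⟨0, by rw [← h0]; exact hsome, hq⟩
  have hgA := pvLoopA_good (pvGraphA n paths)
    (PySem.Set.ofList ((PySem.List.sorted summits (fun y => y) false).map (pvSlot n)))
    (pvEdgesB n paths) (fun x : Nat => x ∈ summits.map (pvSlot n)) (pvBest0 n gates)
    (pvGraph_edges_iff n paths) hSmA hE' (pvBest0 n gates) (pvInitA n gates).1 hbA hcovA
  have hgB := pvLoopB_good (PySem.Set.ofList (summits.map (pvSlot n))) (pvEdgesB n paths)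
    (fun x : Nat => x ∈ summits.map (pvSlot n)) (pvBest0 n gates) hSmB hE'
    (pvBest0 n gates) rfl hval hle
  have hvis : pvLoopA (pvGraphA n paths)
      (PySem.Set.ofList ((PySem.List.sorted summits (fun y => y) false).map (pvSlot n)))
      (pvBest0 n gates) (pvInitA n gates).1 =
      pvLoopB (PySem.Set.ofList (summits.map (pvSlot n))) (pvEdgesB n paths) (pvBest0 n gates) :=
    pvGood_unique hE' hgA hgB
  simp only [solution, solution_alt, hsnd, hvis]
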